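-- pv_equiv track=rewrite | github.com/pypi-data/pypi-mirror-69 | packages/hytools/hytools-0.0.10.tar.gz/hytools-0.0.10/hytools/vtc_utils.py | find_bounds
-- ===== SOURCE A (Python) =====
-- def find_bounds(array):
--     ### Create a list of tuples, each containing the first and last values of every ordered sequences
--     # contained in a 1D array
--
--     def find_jumps(array):
--         ### Finds the jumps in an array containing ordered sequences
--         jumps = []
--         for i,_ in enumerate(array):
--             try:
--                 if array[i+1] != array[i]+1:
--                     jumps.append(i)
--             except:
--                 break
--         return jumps
--
--     jumps = find_jumps(array)
--     bounds = []
--     for i, jump in enumerate(jumps):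
--         if jump == jumps[0]:
--             bounds.append(tuple([array[0], array[jump]]))
--         else:
--             bounds.append(tuple([array[jumps[i-1]+1], array[jump]]))
--         if i == len(jumps)-1:
--             bounds.append(tuple([array[jump+1], array[-1]]))
--     return bounds
-- ===== SOURCE B (Python) =====
-- def find_bounds(array):
--     ### Create a list of tuples, each containing the first and last values of every ordered sequences
--     # contained in a 1D array.
--     # One streaming pass; unlike A, a single unbroken run yields its (first, last) bounds.
--     bounds = []
--     start = 0
--     for i in range(len(array) - 1):
--         if array[i + 1] != array[i] + 1:
--             bounds.append((array[start], array[i]))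
--             start = i + 1
--     if array:
--         bounds.append((array[start], array[-1]))
--     return bounds
-- ===== Notes on version B (the rewrite author's own statement) =====
-- stated objective: simpler
-- what changed: Replaced A's two-phase structure (build a jump-index list, then a second index-arithmetic pass with jumps[0]/jumps[i-1] lookups) by one streaming pass that emits a (start,end) pair at each break and the trailing run at the end, so no intermediate jump list is built.
-- intended difference: On nonempty arrays that form a single unbroken consecutive run, A returns no pairs at all while B returns the one pair holding the first and last element, the bounds of that run, which is the function's stated purpose; A's empty result is an accident of its empty jump list. — e.g. on find_bounds([3, 4]): A returns [], B returns [(3, 4)]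
import Mathlib
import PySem

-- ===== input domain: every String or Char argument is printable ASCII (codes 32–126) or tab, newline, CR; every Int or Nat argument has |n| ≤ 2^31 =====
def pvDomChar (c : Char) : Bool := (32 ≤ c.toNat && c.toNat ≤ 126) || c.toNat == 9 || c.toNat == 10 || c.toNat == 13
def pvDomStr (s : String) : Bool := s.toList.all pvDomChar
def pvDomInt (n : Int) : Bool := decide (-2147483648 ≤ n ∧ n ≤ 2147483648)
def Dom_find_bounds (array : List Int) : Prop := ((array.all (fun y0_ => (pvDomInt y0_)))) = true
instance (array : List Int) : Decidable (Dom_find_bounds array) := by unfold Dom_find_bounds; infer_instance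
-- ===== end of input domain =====

-- B replaces A's two-phase jump-list + index-arithmetic pass by one streaming pass (objective: simpler);
-- on a nonempty single consecutive run A returns no pairs while B returns the run's bounds (see D_ below).

-- ===== PORT A =====
-- find_jumps: for i,_ in enumerate(array): try: if array[i+1] != array[i]+1: jumps.append(i)  except: break
-- (fuel = array.length is a pure totality guard: the loop index i starts at 0 and the loop stops once i reaches len)
def findJumpsA (array : List Int) : Nat → Nat → List Int → List Int
  | 0, _, jumps => jumps
  | fuel + 1, i, jumps =>
    if i < array.length then
      match PySem.List.pyGet? array ((i : Int) + 1) with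
      | none => jumps
      | some v =>
        findJumpsA array fuel (i + 1)
          (if v ≠ PySem.List.pyGetD array (i : Int) 0 + 1 then jumps ++ [(i : Int)] else jumps)
    else jumps

def find_bounds (array : List Int) : List (Int × Int) :=
  let jumps := findJumpsA array array.length 0 []
  (PySem.List.enumerate jumps 0).foldl (fun bounds p =>
    let i := p.1
    let jump := p.2
    let bounds :=
      if jump = PySem.List.pyGetD jumps 0 0 then
        bounds ++ [(PySem.List.pyGetD array 0 0, PySem.List.pyGetD array jump 0)]
      else
        bounds ++ [(PySem.List.pyGetD array (PySem.List.pyGetD jumps (i - 1) 0 + 1) 0,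
                    PySem.List.pyGetD array jump 0)]
    if i = (jumps.length : Int) - 1 then
      bounds ++ [(PySem.List.pyGetD array (jump + 1) 0, PySem.List.pyGetD array (-1) 0)]
    else bounds) []

-- ===== PORT B =====
-- for i in range(len(array)-1): on a break append (array[start], array[i]) and restart the run
-- (fuel = array.length is a pure totality guard for the same index loop)
def altLoopB (array : List Int) : Nat → Nat → Nat → List (Int × Int) →
    List (Int × Int) × Nat
  | 0, _, start, bounds => (bounds, start)
  | fuel + 1, i, start, bounds =>
    if i + 1 < array.length then
      if PySem.List.pyGetD array ((i : Int) + 1) 0 ≠ PySem.List.pyGetD array (i : Int) 0 + 1 then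
        altLoopB array fuel (i + 1) (i + 1)
          (bounds ++ [(PySem.List.pyGetD array (start : Int) 0, PySem.List.pyGetD array (i : Int) 0)])
      else altLoopB array fuel (i + 1) start bounds
    else (bounds, start)

def find_bounds_alt (array : List Int) : List (Int × Int) :=
  let r := altLoopB array array.length 0 0 []
  if array.isEmpty then r.1
  else r.1 ++ [(PySem.List.pyGetD array ((r.2 : Nat) : Int) 0, PySem.List.pyGetD array (-1) 0)]

-- ===== PRECONDITION & SPEC =====
-- On nonempty arrays forming a single unbroken consecutive run A returns no pairs at all (its jump
-- list is empty, an accident of its implementation) while B returns the one pair of the first and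
-- last element, the bounds of that run, which is the function's stated purpose.
def D_find_bounds (array : List Int) : Prop :=
  array ≠ [] ∧ ∀ k ∈ List.range array.length,
    k + 1 < array.length → array.getD (k + 1) 0 = array.getD k 0 + 1
instance (array : List Int) : Decidable (D_find_bounds array) := by
  unfold D_find_bounds; infer_instance

def Spec_find_bounds (array : List Int) (out : List (Int × Int)) : Prop :=
  ¬ D_find_bounds array → out = find_bounds_alt array
instance (array : List Int) (out : List (Int × Int)) : Decidable (Spec_find_bounds array out) := by
  unfold Spec_find_bounds; infer_instance

def pvDiffWitness_find_bounds : List Int := [3, 4]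
def pvDiffWitnessOut_find_bounds : (List (Int × Int)) × (List (Int × Int)) :=
  ([], [(3, 4)])

-- ===== CLAIM (what is proved, stated in full; the proofs are below) =====
def Claim_unchanged_find_bounds : Prop :=
  ∀ (array : List Int), Dom_find_bounds array → Spec_find_bounds array (find_bounds array)
def Claim_changed_find_bounds : Prop :=
  Dom_find_bounds (pvDiffWitness_find_bounds) ∧ D_find_bounds (pvDiffWitness_find_bounds) ∧
  find_bounds (pvDiffWitness_find_bounds) = pvDiffWitnessOut_find_bounds.1 ∧
  find_bounds_alt (pvDiffWitness_find_bounds) = pvDiffWitnessOut_find_bounds.2 ∧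
  pvDiffWitnessOut_find_bounds.1 ≠ pvDiffWitnessOut_find_bounds.2
def Claim_exact_find_bounds : Prop :=
  ∀ (array : List Int), Dom_find_bounds array → D_find_bounds array →
    find_bounds array ≠ find_bounds_alt array

-- ===== LEMMAS AND PROOFS =====

lemma pyGet_succ_some (array : List Int) (i : Nat) (h : i + 1 < array.length) :
    PySem.List.pyGet? array ((i : Int) + 1) = some (PySem.List.pyGetD array ((i : Int) + 1) 0) := by
  have hc : ((i : Int) + 1) = ((i + 1 : Nat) : Int) := by push_cast; ring
  rw [hc, PySem.List.pyGet?_natCast, PySem.List.pyGetD_natCast]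
  simp [List.getD, List.getElem?_eq_getElem h]

lemma pyGet_succ_none (array : List Int) (i : Nat) (h : ¬ (i + 1 < array.length)) :
    PySem.List.pyGet? array ((i : Int) + 1) = none := by
  rw [PySem.List.pyGet?_eq_none_iff]
  simp only [PySem.Raise.InRange]
  omega

def jlist (array : List Int) (i : Nat) : List Int :=
  if i < array.length then
    match PySem.List.pyGet? array ((i : Int) + 1) with
    | none => []
    | some v =>
      (if v ≠ PySem.List.pyGetD array (i : Int) 0 + 1 then [(i : Int)] else []) ++ jlist array (i + 1)
  else []
termination_by array.length - i

lemma findJumpsA_eq (array : List Int) :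
    ∀ (fuel i : Nat) (jumps : List Int), array.length ≤ i + fuel →
      findJumpsA array fuel i jumps = jumps ++ jlist array i := by
  intro fuel
  induction fuel with
  | zero =>
    intro i jumps hle
    have h : ¬ i < array.length := by omega
    rw [findJumpsA, jlist, if_neg h]
    simp
  | succ fuel ih =>
    intro i jumps hle
    rw [findJumpsA]
    by_cases h : i < array.length
    · rw [jlist, if_pos h, if_pos h]
      cases hg : PySem.List.pyGet? array ((i : Int) + 1) with
      | none => simp
      | some v =>
        dsimp only
        rw [ih (i + 1) _ (by omega)]
        by_cases hc : v ≠ PySem.List.pyGetD array (i : Int) 0 + 1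
        · rw [if_pos hc, if_pos hc]
          simp
        · rw [if_neg hc, if_neg hc]
          simp
    · rw [jlist, if_neg h, if_neg h]
      simp

def segs (array : List Int) (i start : Nat) : List (Int × Int) :=
  if i + 1 < array.length then
    if PySem.List.pyGetD array ((i : Int) + 1) 0 ≠ PySem.List.pyGetD array (i : Int) 0 + 1 then
      (PySem.List.pyGetD array (start : Int) 0, PySem.List.pyGetD array (i : Int) 0)
        :: segs array (i + 1) (i + 1)
    else segs array (i + 1) start
  else [(PySem.List.pyGetD array (start : Int) 0, PySem.List.pyGetD array (-1) 0)]
termination_by array.length - i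

lemma altLoopB_eq (array : List Int) :
    ∀ (fuel i start : Nat) (bounds : List (Int × Int)), array.length ≤ i + 1 + fuel →
      (altLoopB array fuel i start bounds).1 ++
        [(PySem.List.pyGetD array (((altLoopB array fuel i start bounds).2 : Nat) : Int) 0,
          PySem.List.pyGetD array (-1) 0)] = bounds ++ segs array i start := by
  intro fuel
  induction fuel with
  | zero =>
    intro i start bounds hle
    have h : ¬ (i + 1 < array.length) := by omega
    rw [altLoopB, segs, if_neg h]
  | succ fuel ih =>
    intro i start bounds hle
    rw [altLoopB]
    by_cases h : i + 1 < array.length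
    · rw [segs, if_pos h, if_pos h]
      by_cases hv : PySem.List.pyGetD array ((i : Int) + 1) 0 ≠ PySem.List.pyGetD array (i : Int) 0 + 1
      · rw [if_pos hv, if_pos hv, ih (i + 1) (i + 1) _ (by omega)]
        simp
      · rw [if_neg hv, if_neg hv, ih (i + 1) start _ (by omega)]
    · rw [segs, if_neg h, if_neg h]

def boundsRec (array : List Int) (start : Nat) : List Int → List (Int × Int)
  | [] => [(PySem.List.pyGetD array (start : Int) 0, PySem.List.pyGetD array (-1) 0)]
  | j :: rest =>
      (PySem.List.pyGetD array (start : Int) 0, PySem.List.pyGetD array j 0)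
        :: boundsRec array (j.toNat + 1) rest

lemma segs_eq_boundsRec (array : List Int) (i start : Nat) :
    segs array i start = boundsRec array start (jlist array i) := by
  fun_induction segs array i start with
  | case1 i start h hv ih =>
    have hi : i < array.length := by omega
    rw [jlist, if_pos hi, pyGet_succ_some array i h]
    have hc : ¬ (PySem.List.pyGetD array ((i:Int)+1) 0 = PySem.List.pyGetD array (i:Int) 0 + 1) := hv
    simp only [ne_eq, hc, not_false_eq_true, if_true, List.singleton_append, boundsRec]
    rw [ih]
    norm_num
  | case2 i start h hv ih =>
    have hi : i < array.length := by omega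
    rw [jlist, if_pos hi, pyGet_succ_some array i h]
    simp only [ne_eq, not_not] at hv
    simp only [ne_eq, hv, not_true_eq_false, if_false, List.nil_append]
    exact ih
  | case3 i start h =>
    rw [jlist]
    by_cases hi : i < array.length
    · rw [if_pos hi, pyGet_succ_none array i h]
      rfl
    · rw [if_neg hi]
      rfl

lemma jlist_mem_lower (array : List Int) (i : Nat) :
    ∀ x ∈ jlist array i, (i : Int) ≤ x ∧ 0 ≤ x := by
  fun_induction jlist array i with
  | case1 i h hg => simp
  | case2 i h v hg ih =>
    intro x hx
    simp only [List.mem_append] at hx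
    rcases hx with hx | hx
    · split at hx <;> simp at hx
      subst hx
      constructor <;> omega
    · have := ih x hx
      push_cast at this ⊢
      omega
  | case3 i h => simp

lemma jlist_pairwise (array : List Int) (i : Nat) :
    (jlist array i).Pairwise (· < ·) := by
  fun_induction jlist array i with
  | case1 i h hg => simp
  | case2 i h v hg ih =>
    split
    · simp only [List.singleton_append, List.pairwise_cons]
      refine ⟨fun x hx => ?_, ih⟩
      have := (jlist_mem_lower array (i + 1) x hx).1
      push_cast at this
      omega
    · simpa using ih
  | case3 i h => simp

lemma jlist_nil_iff (array : List Int) (i : Nat) :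
    jlist array i = [] ↔
      ∀ k, i ≤ k → k + 1 < array.length → array.getD (k + 1) 0 = array.getD k 0 + 1 := by
  fun_induction jlist array i with
  | case1 i h hg =>
    have h1 : ¬ (i + 1 < array.length) := by
      by_contra hc
      rw [pyGet_succ_some array i hc] at hg
      simp at hg
    simp only [true_iff]
    intro k hik hk1
    omega
  | case2 i h v hg ih =>
    have h1 : i + 1 < array.length := by
      by_contra hc
      rw [pyGet_succ_none array i hc] at hg
      simp at hg
    have hv : v = PySem.List.pyGetD array ((i : Int) + 1) 0 := by
      rw [pyGet_succ_some array i h1] at hg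
      exact (Option.some.inj hg).symm
    have hstep1 : PySem.List.pyGetD array ((i : Int) + 1) 0 = array.getD (i + 1) 0 := by
      have hc : ((i : Int) + 1) = ((i + 1 : Nat) : Int) := by push_cast; ring
      rw [hc, PySem.List.pyGetD_natCast]
    have hstep0 : PySem.List.pyGetD array (i : Int) 0 = array.getD i 0 := by
      rw [PySem.List.pyGetD_natCast]
    constructor
    · intro hnil k hik hk1
      rw [List.append_eq_nil_iff] at hnil
      rcases hnil with ⟨hif, hrest⟩
      rcases Nat.lt_or_ge i k with hik2 | hik2
      · exact (ih.mp hrest) k (by omega) hk1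
      · have hki : k = i := by omega
        subst hki
        by_contra hne2
        have hvv : v ≠ PySem.List.pyGetD array (k : Int) 0 + 1 := by
          rw [hv, hstep1, hstep0]
          exact hne2
        rw [if_pos hvv] at hif
        simp at hif
    · intro hall
      have hcond : ¬ (v ≠ PySem.List.pyGetD array (i : Int) 0 + 1) := by
        simp only [not_not]
        rw [hv, hstep1, hstep0]
        exact hall i (le_refl i) h1
      rw [if_neg hcond, List.nil_append]
      exact ih.mpr (fun k hik hk1 => hall k (by omega) hk1)
  | case3 i h =>
    simp only [true_iff]
    intro k hik hk1
    omega

def bodyA (array : List Int) (jumps : List Int) :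
    List (Int × Int) → Int × Int → List (Int × Int) := fun bounds p =>
  let i := p.1
  let jump := p.2
  let bounds :=
    if jump = PySem.List.pyGetD jumps 0 0 then
      bounds ++ [(PySem.List.pyGetD array 0 0, PySem.List.pyGetD array jump 0)]
    else
      bounds ++ [(PySem.List.pyGetD array (PySem.List.pyGetD jumps (i - 1) 0 + 1) 0,
                  PySem.List.pyGetD array jump 0)]
  if i = (jumps.length : Int) - 1 then
    bounds ++ [(PySem.List.pyGetD array (jump + 1) 0, PySem.List.pyGetD array (-1) 0)]
  else bounds

lemma find_bounds_eq_fold (array : List Int) :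
    find_bounds array =
      (PySem.List.enumerate (jlist array 0) 0).foldl (bodyA array (jlist array 0)) [] := by
  rw [find_bounds, findJumpsA_eq array array.length 0 [] (by omega)]
  rfl

lemma foldA_suffix (array : List Int) (J : List Int)
    (hp : J.Pairwise (· < ·)) (hnn : ∀ x ∈ J, 0 ≤ x) :
    ∀ (rest : List Int) (k : Nat) (acc : List (Int × Int)) (prev : Int),
      1 ≤ k → rest ≠ [] → J.drop k = rest → J[k - 1]? = some prev →
      (PySem.List.enumerate rest (k : Int)).foldl (bodyA array J) acc =
        acc ++ boundsRec array (prev.toNat + 1) rest := by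
  intro rest
  induction rest with
  | nil => intro _ _ _ _ hne; exact absurd rfl hne
  | cons j rest' ihr =>
    intro k acc prev hk _ hdrop hprev
    have hklen : k + (j :: rest').length = J.length := by
      have hlen := congrArg List.length hdrop
      simp only [List.length_drop] at hlen
      have hk2 : k ≤ J.length := by
        by_contra hc
        rw [List.drop_eq_nil_of_le (by omega)] at hdrop
        simp at hdrop
      omega
    have hJk : J[k]? = some j := by
      have h0 : (J.drop k)[0]? = some j := by rw [hdrop]; rfl
      simpa using h0
    have hkltJ : k < J.length := (List.getElem?_eq_some_iff.mp hJk).1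
    have hJkval : J[k] = j := by
      rcases List.getElem?_eq_some_iff.mp hJk with ⟨hh, hvv⟩
      exact hvv
    have hne_head : j ≠ PySem.List.pyGetD J 0 0 := by
      have h0 : 0 < J.length := by omega
      have hJ0 : PySem.List.pyGetD J 0 0 = J[0] := by
        have hc : ((0 : Int)) = ((0 : Nat) : Int) := rfl
        rw [hc, PySem.List.pyGetD_natCast]
        simp [List.getD, List.getElem?_eq_getElem h0]
      have hlt : J[0] < J[k] := List.pairwise_iff_getElem.mp hp 0 k h0 hkltJ (by omega)
      rw [hJ0, ← hJkval]
      omega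
    have hprevD : PySem.List.pyGetD J ((k : Int) - 1) 0 = prev := by
      have hc : ((k : Int) - 1) = ((k - 1 : Nat) : Int) := by omega
      rw [hc, PySem.List.pyGetD_natCast]
      simp [List.getD_eq_getElem?_getD, hprev]
    have hprevnn : 0 ≤ prev := hnn prev (List.mem_of_getElem? hprev)
    have hprevcast : prev + 1 = ((prev.toNat + 1 : Nat) : Int) := by omega
    have hjnn : 0 ≤ j := hnn j (hJkval ▸ List.getElem_mem hkltJ)
    have hjcast : j + 1 = ((j.toNat + 1 : Nat) : Int) := by omega
    cases rest' with
    | nil =>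
      have hlast : (k : Int) = (J.length : Int) - 1 := by
        simp only [List.length_cons, List.length_nil] at hklen
        omega
      rw [PySem.List.enumerate_cons, PySem.List.enumerate_nil]
      simp only [List.foldl_cons, List.foldl_nil, bodyA, if_neg hne_head, hprevD]
      rw [if_pos hlast, hprevcast, hjcast]
      rw [boundsRec, boundsRec, List.append_assoc]
      rfl
    | cons j2 rest2 =>
      have hnotlast : ¬ ((k : Int) = (J.length : Int) - 1) := by
        simp only [List.length_cons] at hklen
        omega
      rw [PySem.List.enumerate_cons]
      simp only [List.foldl_cons, bodyA, if_neg hne_head, if_neg hnotlast, hprevD, hprevcast]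
      have hdrop2 : J.drop (k + 1) = j2 :: rest2 := by
        have h2 := congrArg (List.drop 1) hdrop
        rw [List.drop_drop] at h2
        simpa [Nat.add_comm] using h2
      have hJk2 : J[(k + 1) - 1]? = some j := by simpa using hJk
      have hcast1 : (k : Int) + 1 = ((k + 1 : Nat) : Int) := by push_cast; ring
      rw [hcast1, ihr (k + 1) _ j (by omega) (by simp) hdrop2 hJk2]
      rw [boundsRec, List.append_assoc]
      rfl

lemma foldA_eq_boundsRec (array : List Int) (J : List Int)
    (hp : J.Pairwise (· < ·)) (hnn : ∀ x ∈ J, 0 ≤ x) (hne : J ≠ []) :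
    (PySem.List.enumerate J 0).foldl (bodyA array J) [] = boundsRec array 0 J := by
  cases J with
  | nil => exact absurd rfl hne
  | cons j rest =>
    rw [PySem.List.enumerate_cons]
    have hhead : j = PySem.List.pyGetD (j :: rest) 0 0 := by
      rw [PySem.List.pyGetD_zero_cons]
    have hjnn : 0 ≤ j := hnn j (by simp)
    have hjcast : j + 1 = ((j.toNat + 1 : Nat) : Int) := by omega
    cases rest with
    | nil =>
      have hlast : (0 : Int) = (([j] : List Int).length : Int) - 1 := by simp
      rw [PySem.List.enumerate_nil]
      simp only [List.foldl_cons, List.foldl_nil, bodyA]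
      rw [if_pos hhead, if_pos hlast, hjcast, boundsRec, boundsRec]
      have h0 : ((0 : Nat) : Int) = (0 : Int) := rfl
      rw [h0]
      rfl
    | cons j2 rest2 =>
      have hlen : ¬ ((0 : Int) = (((j :: j2 :: rest2) : List Int).length : Int) - 1) := by
        simp only [List.length_cons]
        push_cast
        omega
      simp only [List.foldl_cons, bodyA]
      rw [if_pos hhead, if_neg hlen]
      have hdrop : (j :: j2 :: rest2).drop 1 = j2 :: rest2 := rfl
      have hprev : (j :: j2 :: rest2)[1 - 1]? = some j := rfl
      have hcast1 : ((0 : Int) + 1) = ((1 : Nat) : Int) := by norm_num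
      rw [hcast1, foldA_suffix array _ hp hnn (j2 :: rest2) 1 _ j (by omega) (by simp) hdrop hprev]
      rw [boundsRec, boundsRec]
      have h0 : ((0 : Nat) : Int) = (0 : Int) := rfl
      rw [h0]
      rfl

lemma D_iff_jlist_nil (array : List Int) (hne : array ≠ []) :
    D_find_bounds array ↔ jlist array 0 = [] := by
  rw [jlist_nil_iff]
  unfold D_find_bounds
  constructor
  · intro ⟨_, hd⟩ k _ hk1
    exact hd k (List.mem_range.mpr (by omega)) hk1
  · intro hj
    exact ⟨hne, fun k _ hk1 => hj k (Nat.zero_le k) hk1⟩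

lemma find_bounds_alt_eq_segs (array : List Int) (hne : array ≠ []) :
    find_bounds_alt array = segs array 0 0 := by
  rw [find_bounds_alt]
  have h := altLoopB_eq array array.length 0 0 [] (by omega)
  simp only [List.nil_append] at h
  simp only [List.isEmpty_iff, hne]
  rw [← h]
  simp

lemma find_bounds_characterized (array : List Int) (hne : jlist array 0 ≠ []) :
    find_bounds array = boundsRec array 0 (jlist array 0) := by
  rw [find_bounds_eq_fold]
  exact foldA_eq_boundsRec array _ (jlist_pairwise array 0)
    (fun x hx => (jlist_mem_lower array 0 x hx).2) hne

lemma find_bounds_nil_of_jlist_nil (array : List Int) (h : jlist array 0 = []) :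
    find_bounds array = [] := by
  rw [find_bounds_eq_fold, h]
  rfl

-- ===== VERDICT (by name: the statement is the Claim_ definition above) =====
theorem find_bounds_spec : Claim_unchanged_find_bounds := by
  intro array _
  unfold Spec_find_bounds
  intro hnD
  by_cases hne : array = []
  · subst hne; decide
  · have hj : jlist array 0 ≠ [] := fun hnil =>
      hnD ((D_iff_jlist_nil array hne).mpr hnil)
    rw [find_bounds_characterized array hj, find_bounds_alt_eq_segs array hne,
      segs_eq_boundsRec]

theorem find_bounds_changed : Claim_changed_find_bounds := by
  unfold Claim_changed_find_bounds; decide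

theorem find_bounds_tight : Claim_exact_find_bounds := by
  intro array _ hD
  have hne : array ≠ [] := hD.1
  have hj : jlist array 0 = [] := (D_iff_jlist_nil array hne).mp hD
  rw [find_bounds_nil_of_jlist_nil array hj, find_bounds_alt_eq_segs array hne,
    segs_eq_boundsRec, hj, boundsRec]
  simp
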